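-- pv_equiv track=rewrite | github.com/all1m-algorithm-study/2021-1-Algorithm-Study | week4/Group6/boj1802_parkjinsung.py | check_dongho
-- ===== SOURCE A (Python) =====
-- def check_dongho(case, length):
--     if length == 1:
--         return "YES"
--
--     if length == 3:
--         if case[0] == case[2]:
--             return "NO"
--         elif case[0] != case[2]:
--             return "YES"
--
--     else:
--         flag = True
--         temp1 = case[:int((length)/2)]
--         temp2 = case[int((length+1)/2):]
--         temp2 = temp2[::-1]
--         for i in range(len(temp1)):
--             if temp1[i] == temp2[i]:
--                 flag = False
--                 break
--         if flag == True:
--             return check_dongho(temp1, len(temp1))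
--         elif flag == False:
--             return "NO"
-- ===== SOURCE B (Python) =====
-- def check_dongho(case, length):
--     # Index-arithmetic rewrite: no slicing/reversal, just shrink the active
--     # prefix length n, comparing case[i] against its mirror case[n-1-i].
--     n = length
--     while n > 1:
--         h = n // 2
--         for i in range(h):
--             if case[i] == case[n - 1 - i]:
--                 return "NO"
--         n = h
--     return "YES"
-- ===== Notes on version B (the rewrite author's own statement) =====
-- stated objective: alternative
-- what changed: B replaces A's recursive slice-and-reverse construction (temp1/temp2 copies at every level) by a single iterative loop over a shrinking prefix length n that compares case[i] with its mirror case[n-1-i] by index arithmetic, never building a new list.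
-- outside the precondition, e.g. on check_dongho(['a', 'x', 'a'], 2): A returns 'NO', B returns 'YES'; on check_dongho(['', 'N', 'NO', '', 'NY', 'x'], 4): A returns 'YES', B returns 'NO'
import Mathlib
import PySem

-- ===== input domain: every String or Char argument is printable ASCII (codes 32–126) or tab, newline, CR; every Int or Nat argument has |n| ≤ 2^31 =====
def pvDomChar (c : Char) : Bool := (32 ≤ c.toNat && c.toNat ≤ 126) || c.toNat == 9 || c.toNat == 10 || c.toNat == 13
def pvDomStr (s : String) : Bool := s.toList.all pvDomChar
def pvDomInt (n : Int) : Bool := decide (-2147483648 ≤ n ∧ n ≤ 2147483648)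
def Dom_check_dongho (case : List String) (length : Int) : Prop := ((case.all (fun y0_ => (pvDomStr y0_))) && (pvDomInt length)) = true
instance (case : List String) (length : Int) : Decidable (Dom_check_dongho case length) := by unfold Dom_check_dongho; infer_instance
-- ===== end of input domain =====

-- B rewrites A's recursive slice-and-reverse halving as one index-arithmetic loop on a shrinking
-- prefix length (objective: alternative decomposition, no list copies).

-- ===== PORT A =====
-- Literal transliteration of A. The recursion is made total with a fuel counter (length.toNat + 1
-- suffices everywhere A terminates; fuel exhaustion and IndexError at length==3 return "" — both
-- unreachable under Pre_). int(x/2) on |x| ≤ 2^31 is exact float division truncated toward zero,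
-- i.e. Int.tdiv.
def check_dongho_go : Nat → List String → Int → String
  | 0, _, _ => ""  -- fuel exhausted (Python would recurse forever / hit RecursionError); outside Pre_
  | fuel + 1, case, length =>
    if length = 1 then "YES"
    else if length = 3 then
      match PySem.List.pyGet? case 0, PySem.List.pyGet? case 2 with
      | some a, some b => if a == b then "NO" else "YES"
      | _, _ => ""  -- IndexError; outside Pre_
    else
      let temp1 := PySem.List.slice case none (some (Int.tdiv length 2))
      let temp2 := PySem.List.slice case (some (Int.tdiv (length + 1) 2)) none
      let temp2 := temp2.reverse  -- temp2[::-1] (PySem.List.slice?_none_none_neg_one)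
      -- for i in range(len(temp1)): if temp1[i]==temp2[i]: flag=False; break
      let found := (PySem.List.pyRange 0 (temp1.length : Int) 1).any
        (fun i => PySem.List.pyGet? temp1 i == PySem.List.pyGet? temp2 i)
      if !found then check_dongho_go fuel temp1 (temp1.length : Int) else "NO"

def check_dongho (case : List String) (length : Int) : String :=
  check_dongho_go (length.toNat + 1) case length

-- ===== PORT B =====
-- B: while n > 1: compare case[i] with case[n-1-i] for i in range(n//2); "NO" on a match, else n := n//2.
def check_dongho_alt_go (case : List String) (n : Int) : String :=
  if _hn : n ≤ 1 then "YES"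
  else
    let h := PySem.Int.floordiv n 2
    if (PySem.List.pyRange 0 h 1).any
        (fun i => PySem.List.pyGet? case i == PySem.List.pyGet? case (n - 1 - i))
    then "NO"
    else check_dongho_alt_go case h
termination_by n.toNat
decreasing_by
  have h2 : (2:Int) > 0 := by omega
  rw [PySem.Int.floordiv_eq_ediv_of_pos h2]
  omega

def check_dongho_alt (case : List String) (length : Int) : String :=
  check_dongho_alt_go case length

-- ===== PRECONDITION & SPEC =====
-- Pre_ admits the intended consistent calls (length = len(case) ≥ 1) plus the mismatched calls on
-- which the two defensible readings provably coincide: length == 1, length == 3 with ≥ 3 elements,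
-- and length == 2 when comparing case[0] with case[1] agrees with comparing it with the last element.
-- The remaining mismatched-length calls are excluded: there A usually raises IndexError or recurses
-- forever, and where it happens to return, its value reads mirror positions of the full list instead
-- of the stated length -- an accident of the mismatch, as defensible as any other.
def Pre_check_dongho (case : List String) (length : Int) : Prop :=
  length = 1 ∨ (length = 3 ∧ 3 ≤ (case.length : Int)) ∨
  (length = 2 ∧ 2 ≤ (case.length : Int) ∧ ((case[0]? = case[1]?) ↔ (case[0]? = case.getLast?))) ∨
  (length = (case.length : Int) ∧ 1 ≤ length)
instance (case : List String) (length : Int) : Decidable (Pre_check_dongho case length) := by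
  unfold Pre_check_dongho; infer_instance

def pvWitness_check_dongho : List String × Int := (["a", "b", "a"], 3)

def Spec_check_dongho (case : List String) (length : Int) (out : String) : Prop :=
  out = check_dongho_alt case length
instance (case : List String) (length : Int) (out : String) : Decidable (Spec_check_dongho case length out) := by
  unfold Spec_check_dongho; infer_instance

-- ===== CLAIM (what is proved, stated in full; the proofs are below) =====
def Claim_equal_check_dongho : Prop := ∀ (case : List String) (length : Int), Dom_check_dongho case length → Pre_check_dongho case length → Spec_check_dongho case length (check_dongho case length)

-- ===== LEMMAS AND PROOFS =====


theorem pv_get {α : Type} (xs : List α) (i : Int) (h0 : 0 ≤ i) (h : i.toNat < xs.length) :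
    PySem.List.pyGet? xs i = some (xs[i.toNat]'h) := by
  rw [PySem.List.pyGet?_of_nonneg xs h0, List.getElem?_eq_getElem h]

theorem pv_any_congr {α : Type} (l : List α) (p q : α → Bool) (h : ∀ a ∈ l, p a = q a) :
    l.any p = l.any q := by
  induction l with
  | nil => rfl
  | cons a t ih => simp_all [List.any_cons]

theorem pv_tdiv_two (m : Nat) : Int.tdiv (m:Int) 2 = ((m/2 : Nat) : Int) := by
  rw [Int.tdiv_eq_ediv]; simp

theorem pv_tdiv_two' (m : Nat) : Int.tdiv ((m:Int)+1) 2 = (((m+1)/2 : Nat) : Int) := by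
  have h : ((m:Int)+1) = ((m+1 : Nat) : Int) := by norm_cast
  rw [h, Int.tdiv_eq_ediv]
  simp
  omega

theorem check_dongho_three (cs : List String) (f : Nat) (hle : 3 ≤ cs.length) :
    check_dongho_go (f+1) cs 3 = check_dongho_alt_go cs 3 := by
  rw [check_dongho_go, check_dongho_alt_go]
  have h0 : 0 < cs.length := by omega
  have h2 : 2 < cs.length := by omega
  have e0 : PySem.List.pyGet? cs (0:Int) = some (cs[0]'h0) := by
    simpa using pv_get cs 0 (by norm_num) (by simpa using h0)
  have e2 : PySem.List.pyGet? cs (2:Int) = some (cs[2]'h2) := by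
    simpa using pv_get cs 2 (by norm_num) (by simpa using h2)
  have hfd : PySem.Int.floordiv (3:Int) 2 = 1 := by decide
  have hrange : PySem.List.pyRange 0 (1:Int) 1 = [0] := by decide
  norm_num [e0, e2, hfd, hrange]
  have hy : check_dongho_alt_go cs 1 = "YES" := by rw [check_dongho_alt_go]; norm_num
  rw [hy]

theorem check_dongho_two (cs : List String) (f : Nat) (hle : 2 ≤ cs.length)
    (hb : (cs[0]? = cs[1]?) ↔ (cs[0]? = cs.getLast?)) :
    check_dongho_go (f+2) cs 2 = check_dongho_alt_go cs 2 := by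
  rw [show f + 2 = (f + 1) + 1 by omega]
  rw [check_dongho_go, check_dongho_alt_go]
  rw [if_neg (by decide : ¬((2:Int) = 1)), if_neg (by decide : ¬((2:Int) = 3)),
      dif_neg (by decide : ¬((2:Int) ≤ 1))]
  have hs1 : PySem.List.slice cs none (some (Int.tdiv 2 2)) = cs.take 1 := by
    rw [show Int.tdiv 2 2 = 1 by decide]
    rw [PySem.List.slice_to]
    · norm_num
    · norm_num
  have hs2 : PySem.List.slice cs (some (Int.tdiv (2+1) 2)) none = cs.drop 1 := by
    rw [show Int.tdiv (2+1) 2 = 1 by decide]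
    rw [PySem.List.slice_from]
    · norm_num
    · norm_num
  have hl1 : (cs.take 1).length = 1 := by rw [List.length_take]; omega
  have hrange : PySem.List.pyRange 0 (1:Int) 1 = [0] := by decide
  have pA1 : PySem.List.pyGet? (cs.take 1) (0:Int) = cs[0]? := by
    rw [PySem.List.pyGet?_of_nonneg (cs.take 1) (by norm_num)]
    norm_num [List.getElem?_take]
  have pA2 : PySem.List.pyGet? (cs.drop 1).reverse (0:Int) = cs[cs.length - 1]? := by
    rw [PySem.List.pyGet?_of_nonneg ((cs.drop 1).reverse) (by norm_num)]
    have h0 : (0:Int).toNat < (cs.drop 1).length := by rw [List.length_drop]; omega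
    rw [List.getElem?_reverse (by simpa using h0)]
    rw [List.getElem?_drop]
    congr 1
    rw [List.length_drop]
    omega
  have pB1 : PySem.List.pyGet? cs (0:Int) = cs[0]? := by
    rw [PySem.List.pyGet?_of_nonneg cs (by norm_num)]
    norm_num
  have pB2 : PySem.List.pyGet? cs ((2:Int) - 1 - 0) = cs[1]? := by
    rw [show ((2:Int) - 1 - 0) = 1 by norm_num]
    rw [PySem.List.pyGet?_of_nonneg cs (by norm_num)]
    norm_num
  have hlast : cs.getLast? = cs[cs.length - 1]? := List.getLast?_eq_getElem?
  have hfd : PySem.Int.floordiv (2:Int) 2 = 1 := by decide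
  have hfound : (cs[0]? == cs[cs.length - 1]?) = (cs[0]? == cs[1]?) := by
    rw [hlast] at hb
    by_cases h01 : cs[0]? = cs[1]?
    · rw [← h01, ← hb.mp h01]
    · have h0l : ¬ (cs[0]? = cs[cs.length - 1]?) := fun h => h01 (hb.mpr h)
      simp [h01, h0l]
  have hy : check_dongho_alt_go cs 1 = "YES" := by rw [check_dongho_alt_go]; norm_num
  have hy2 : check_dongho_go (f+1) (cs.take 1) (1 : Int) = "YES" := by
    rw [check_dongho_go]
    norm_num
  simp only [hs1, hs2, hl1, hfd, hrange, Nat.cast_one, List.any_cons, List.any_nil,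
    Bool.or_false, pA1, pA2, pB1, pB2, hfound, hy, hy2]
  cases hc : (cs[0]? == cs[1]?) <;> simp [hc]

theorem check_dongho_main : ∀ (m : Nat) (cs : List String), 1 ≤ m → m ≤ cs.length →
    ∀ fuel : Nat, m ≤ fuel → check_dongho_go fuel (cs.take m) (m : Int) = check_dongho_alt_go cs (m : Int) := by
  intro m
  induction m using Nat.strong_induction_on with
  | _ m IH =>
  intro cs h1 hle fuel hf
  obtain ⟨f, rfl⟩ : ∃ f, fuel = f + 1 := ⟨fuel - 1, by omega⟩
  rw [check_dongho_go, check_dongho_alt_go]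
  by_cases hm1 : m = 1
  · subst hm1; norm_num
  by_cases hm3 : m = 3
  · subst hm3
    have h0 : 0 < cs.length := by omega
    have h2 : 2 < cs.length := by omega
    have e0 : PySem.List.pyGet? cs (0:Int) = some (cs[0]'h0) := by
      simpa using pv_get cs 0 (by norm_num) (by simpa using h0)
    have e2 : PySem.List.pyGet? cs (2:Int) = some (cs[2]'h2) := by
      simpa using pv_get cs 2 (by norm_num) (by simpa using h2)
    have e0' : PySem.List.pyGet? (cs.take 3) (0:Int) = some (cs[0]'h0) := by
      have hl : (0:Int).toNat < (cs.take 3).length := by rw [List.length_take]; omega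
      simpa [List.getElem_take] using pv_get (cs.take 3) 0 (by norm_num) hl
    have e2' : PySem.List.pyGet? (cs.take 3) (2:Int) = some (cs[2]'h2) := by
      have hl : (2:Int).toNat < (cs.take 3).length := by rw [List.length_take]; omega
      simpa [List.getElem_take] using pv_get (cs.take 3) 2 (by norm_num) hl
    have hfd : PySem.Int.floordiv (3:Int) 2 = 1 := by decide
    have hrange : PySem.List.pyRange 0 (1:Int) 1 = [0] := by decide
    norm_num [e0, e2, e0', e2', hfd, hrange]
    have hy : check_dongho_alt_go cs 1 = "YES" := by rw [check_dongho_alt_go]; norm_num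
    rw [hy]
  · -- general case: m = 2 or m ≥ 4
    have hm2 : 2 ≤ m := by omega
    set h := m / 2 with hh
    set k := (m+1) / 2 with hk
    have hhb : 1 ≤ h ∧ h < m ∧ h + k = m ∧ k ≤ m := by omega
    have c1 : ¬ ((m:Int) = 1) := by omega
    have c3 : ¬ ((m:Int) = 3) := by omega
    have cb : ¬ ((m:Int) ≤ 1) := by omega
    rw [if_neg c1, if_neg c3, dif_neg cb]
    have ht1 : PySem.List.slice (cs.take m) none (some (Int.tdiv (m:Int) 2)) = cs.take h := by
      rw [pv_tdiv_two, PySem.List.slice_to_natCast, List.take_take]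
      congr 1
      omega
    have ht2 : PySem.List.slice (cs.take m) (some (Int.tdiv ((m:Int)+1) 2)) none = (cs.take m).drop k := by
      rw [pv_tdiv_two', PySem.List.slice_from_natCast]
    have hlen1 : (cs.take h).length = h := by
      simp [List.length_take]; omega
    have hfd : PySem.Int.floordiv (m:Int) 2 = (h:Int) := by
      rw [PySem.Int.floordiv_eq_ediv_of_pos (by omega)]
      omega
    have hany : (PySem.List.pyRange 0 ((cs.take h).length : Int) 1).any
          (fun i => PySem.List.pyGet? (cs.take h) i == PySem.List.pyGet? ((cs.take m).drop k).reverse i)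
        = (PySem.List.pyRange 0 (PySem.Int.floordiv (m:Int) 2) 1).any
          (fun i => PySem.List.pyGet? cs i == PySem.List.pyGet? cs ((m:Int) - 1 - i)) := by
      rw [hlen1, hfd]
      apply pv_any_congr
      intro i hi
      rw [PySem.List.mem_pyRange_one] at hi
      obtain ⟨hi0, hih⟩ := hi
      obtain ⟨j, rfl⟩ : ∃ j : Nat, i = (j:Int) := ⟨i.toNat, by omega⟩
      have hjh : j < h := by exact_mod_cast hih
      have hjm : m - 1 - j < cs.length := by omega
      have hjc : j < cs.length := by omega
      have eA1 : PySem.List.pyGet? (cs.take h) (j:Int) = some (cs[j]'hjc) := by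
        rw [PySem.List.pyGet?_natCast]
        simp [List.getElem?_take, hjh, List.getElem?_eq_getElem hjc]
      have hlen2 : ((cs.take m).drop k).length = h := by
        simp [List.length_drop, List.length_take]; omega
      have eA2 : PySem.List.pyGet? ((cs.take m).drop k).reverse (j:Int) = some (cs[m-1-j]'hjm) := by
        rw [PySem.List.pyGet?_natCast]
        rw [List.getElem?_reverse (by omega)]
        rw [hlen2]
        rw [List.getElem?_drop]
        rw [show k + (h - 1 - j) = m - 1 - j by omega]
        simp [List.getElem?_eq_getElem hjm, (by omega : m - 1 - j < m)]
      have eB1 : PySem.List.pyGet? cs (j:Int) = some (cs[j]'hjc) := by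
        rw [PySem.List.pyGet?_natCast]
        simp [List.getElem?_eq_getElem hjc]
      have eB2 : PySem.List.pyGet? cs ((m:Int) - 1 - (j:Int)) = some (cs[m-1-j]'hjm) := by
        have hcast : (m:Int) - 1 - (j:Int) = ((m - 1 - j : Nat) : Int) := by omega
        rw [hcast, PySem.List.pyGet?_natCast]
        simp [List.getElem?_eq_getElem hjm]
      simp only [eA1, eA2, eB1, eB2]
    simp only [ht1, ht2, hany]
    rcases hb : (PySem.List.pyRange 0 (PySem.Int.floordiv (m:Int) 2) 1).any
        (fun i => PySem.List.pyGet? cs i == PySem.List.pyGet? cs ((m:Int) - 1 - i)) with _ | _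
    · simp only [Bool.not_false, if_true, if_pos]
      rw [hlen1, hfd]
      exact IH h (by omega) cs (by omega) (by omega) f (by omega)
    · simp


-- ===== VERDICT (by name: the statement is the Claim_ definition above) =====
theorem check_dongho_spec : Claim_equal_check_dongho := by
  intro cs length _ hpre
  unfold Spec_check_dongho check_dongho check_dongho_alt
  rcases hpre with h1 | ⟨h3, hlen3⟩ | ⟨h2, hlen2, hb2⟩ | ⟨hlen, hpos⟩
  · subst h1
    rw [check_dongho_go, check_dongho_alt_go]
    norm_num
  · subst h3
    exact check_dongho_three cs _ (by exact_mod_cast hlen3)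
  · subst h2
    exact check_dongho_two cs _ (by exact_mod_cast hlen2) hb2
  · subst hlen
    have := check_dongho_main cs.length cs (by exact_mod_cast hpos) le_rfl (cs.length + 1) (by omega)
    simpa [List.take_length, Int.toNat_natCast] using this
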